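-- pv_equiv track=rewrite | github.com/hammii/Algorithm | Programmers_python/신고_결과_받기.py | solution
-- ===== SOURCE A (Python) =====
-- def solution(id_list, report, k):
--     report_dict = dict()
--     banned_cnt = dict()
--     answer = []
--
--     for id in id_list:
--         report_dict[id] = set()
--         banned_cnt[id] = 0
--
--     for r in set(report):
--         user, target = r.split()[0], r.split()[1]
--         report_dict[user].add(target)
--         banned_cnt[target] += 1
--
--     for id in id_list:
--         result = 0
--         for target in report_dict[id]:
--             if banned_cnt[target] >= k:
--                 result += 1
--         answer.append(result)
--
--     return answer
-- ===== SOURCE B (Python) =====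
-- def solution(id_list, report, k):
--     reports = set(report)
--     pairs = {(r.split()[0], r.split()[1]) for r in reports}
--     targets = [r.split()[1] for r in reports]
--     return [sum(1 for u, t in pairs if u == i and targets.count(t) >= k)
--             for i in id_list]
-- ===== Notes on version B (the rewrite author's own statement) =====
-- stated objective: simpler
-- what changed: B drops all of A's dictionaries and staged mutation loops: it builds the distinct (reporter,target) pairs and the list of targets of the distinct reports, then expresses each answer directly as a comprehension count over the pairs with targets.count(t) >= k as the ban test - brute-force counting instead of A's dict-building passes.
import Mathlib
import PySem

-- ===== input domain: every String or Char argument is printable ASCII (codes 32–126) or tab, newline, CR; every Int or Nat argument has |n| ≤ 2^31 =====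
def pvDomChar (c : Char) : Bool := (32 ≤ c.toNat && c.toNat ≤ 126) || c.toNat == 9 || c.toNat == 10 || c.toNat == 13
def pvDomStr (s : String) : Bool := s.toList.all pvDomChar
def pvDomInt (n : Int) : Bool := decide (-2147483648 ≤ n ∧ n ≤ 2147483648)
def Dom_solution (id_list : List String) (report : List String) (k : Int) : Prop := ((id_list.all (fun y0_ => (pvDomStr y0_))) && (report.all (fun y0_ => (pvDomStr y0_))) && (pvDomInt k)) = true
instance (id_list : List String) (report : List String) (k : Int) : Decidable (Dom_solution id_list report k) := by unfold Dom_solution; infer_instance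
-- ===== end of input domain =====

-- B replaces A's dict-building mutation passes by direct nested comprehension counts
-- over the distinct reports and distinct (reporter,target) pairs (objective: simpler).

-- shared helpers: r.split()[0] and r.split()[1]
def pvU (r : String) : String := PySem.List.pyGetD (PySem.Str.split₀ r) 0 ""
def pvT (r : String) : String := PySem.List.pyGetD (PySem.Str.split₀ r) 1 ""

-- ===== PORT A =====
-- 'report_dict[user].add(target)' / 'banned_cnt[target] += 1' are KeyError on a missing key;
-- ported as 'modify' with a default that Pre_solution guarantees is never used.
def solution (id_list : List String) (report : List String) (k : Int) : List Int :=
  let init : PySem.Dict String (PySem.Set String) × PySem.Dict String Int :=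
    id_list.foldl (fun p id => (p.1.insert id PySem.Set.empty, p.2.insert id (0 : Int)))
      (PySem.Dict.empty, PySem.Dict.empty)
  let st :=
    (PySem.Set.ofList report).foldl (fun p r =>
      (p.1.modify (pvU r) PySem.Set.empty (fun s => PySem.Set.add s (pvT r)),
       p.2.modify (pvT r) 0 (· + 1))) init
  id_list.foldl (fun answer id =>
    answer ++ [(st.1.getD id PySem.Set.empty).foldl
      (fun result target => if k ≤ st.2.getD target 0 then result + 1 else result) (0 : Int)]) []

-- ===== PORT B =====
-- sum(1 for … if cond) is ported as countP, targets.count(t) as List.count (cast to Int).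
def solution_alt (id_list : List String) (report : List String) (k : Int) : List Int :=
  let reports := PySem.Set.ofList report
  let pairs : PySem.Set (String × String) :=
    PySem.Set.ofList (reports.map (fun r => (pvU r, pvT r)))
  let targets : List String := reports.map pvT
  id_list.map (fun i =>
    ((pairs.countP (fun q => q.1 == i && decide (k ≤ (targets.count q.2 : Int)))) : Int))

-- ===== PRECONDITION & SPEC =====
-- Pre_: exactly the inputs where Python A returns normally — every report entry splits into
-- at least two words, and both its reporter and its target occur in id_list (else KeyError/IndexError).
def Pre_solution (id_list : List String) (report : List String) (k : Int) : Prop :=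
  ∀ r ∈ report, 2 ≤ (PySem.Str.split₀ r).length ∧ pvU r ∈ id_list ∧ pvT r ∈ id_list
instance (id_list : List String) (report : List String) (k : Int) : Decidable (Pre_solution id_list report k) := by unfold Pre_solution; infer_instance

def pvWitness_solution : List String × List String × Int :=
  (["muzi", "frodo", "apeach"], ["muzi frodo", "apeach frodo", "muzi frodo"], 2)

def Spec_solution (id_list : List String) (report : List String) (k : Int) (out : List Int) : Prop := out = solution_alt id_list report k
instance (id_list : List String) (report : List String) (k : Int) (out : List Int) : Decidable (Spec_solution id_list report k out) := by unfold Spec_solution; infer_instance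

-- ===== CLAIM (what is proved, stated in full; the proofs are below) =====
def Claim_equal_solution : Prop := ∀ (id_list : List String) (report : List String) (k : Int), Dom_solution id_list report k → Pre_solution id_list report k → Spec_solution id_list report k (solution id_list report k)

-- ===== LEMMAS AND PROOFS =====

-- a fold inserting the same constant value leaves every getD-at-that-default unchanged
theorem pvGetD_foldl_insert_const {ν : Type} (xs : List String) (d : PySem.Dict String ν)
    (v0 : ν) (x : String) (h : d.getD x v0 = v0) :
    (xs.foldl (fun d i => d.insert i v0) d).getD x v0 = v0 := by
  induction xs generalizing d with
  | nil => exact h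
  | cons a l ih =>
      refine ih _ ?_
      rw [PySem.Dict.getD_insert]
      split <;> [rfl; exact h]

-- A's second loop, seen at one key: the targets whose reporter is x, folded into a set
theorem pvRd_getD (l : List String) (d : PySem.Dict String (PySem.Set String)) (x : String) :
    (l.foldl (fun d r => d.modify (pvU r) PySem.Set.empty (fun s => PySem.Set.add s (pvT r))) d).getD x PySem.Set.empty
    = ((l.filter (fun r => pvU r == x)).map pvT).foldl PySem.Set.add (d.getD x PySem.Set.empty) := by
  induction l generalizing d with
  | nil => rfl
  | cons r l ih =>
      rw [List.foldl_cons, ih, List.filter_cons]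
      by_cases h : pvU r = x
      · simp [h]
      · simp [h, PySem.Dict.getD_modify, Ne.symm h]

-- filtering a deduplicated pair list by first component and projecting commutes with dedup
theorem pvProj_foldl {α β : Type} [DecidableEq α] [DecidableEq β]
    (l : List (α × β)) (a : α) (s : PySem.Set (α × β)) :
    ((l.foldl PySem.Set.add s).filter (fun p => p.1 == a)).map Prod.snd
    = ((l.filter (fun p => p.1 == a)).map Prod.snd).foldl PySem.Set.add
        ((s.filter (fun p => p.1 == a)).map Prod.snd) := by
  induction l generalizing s with
  | nil => rfl
  | cons p l ih =>
      rw [List.foldl_cons, ih, List.filter_cons]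
      have base : ((PySem.Set.add s p).filter (fun q => q.1 == a)).map Prod.snd
          = if p.1 = a then PySem.Set.add ((s.filter (fun q => q.1 == a)).map Prod.snd) p.2
            else (s.filter (fun q => q.1 == a)).map Prod.snd := by
        rw [PySem.Set.add_eq_ite]
        by_cases hm : p ∈ s
        · rw [if_pos hm]
          by_cases ha : p.1 = a
          · rw [if_pos ha, PySem.Set.add_of_mem]
            exact List.mem_map_of_mem (List.mem_filter.2 ⟨hm, by simp [ha]⟩)
          · rw [if_neg ha]
        · rw [if_neg hm, List.filter_append, List.map_append]
          by_cases ha : p.1 = a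
          · have hnotmem : p.2 ∉ (s.filter (fun q => q.1 == a)).map Prod.snd := by
              intro hmem
              rcases List.mem_map.1 hmem with ⟨q, hq, hq2⟩
              rcases List.mem_filter.1 hq with ⟨hqs, hqa⟩
              have : q = p := by
                have h1 : q.1 = a := by simpa using hqa
                cases q; cases p; simp_all
              exact hm (this ▸ hqs)
            rw [if_pos ha, PySem.Set.add_of_not_mem hnotmem]
            simp [ha]
          · rw [if_neg ha]
            simp [ha]
      rw [base]
      by_cases ha : p.1 = a
      · simp [ha]
      · simp [ha]

-- the ban-count loop of A, seen at one key
theorem pvBcA_getD (l : List String) (d : PySem.Dict String Int) (x : String) :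
    (l.foldl (fun d r => d.modify (pvT r) 0 (· + 1)) d).getD x 0
    = d.getD x 0 + ((l.map pvT).count x : Int) := by
  rw [← List.foldl_map (f := pvT) (g := fun d x => PySem.Dict.modify d x 0 (· + 1))]
  exact PySem.Dict.getD_foldl_modify_add_one (l.map pvT) d x

theorem pvFoldl_add_empty {α : Type} [BEq α] (xs : List α) :
    xs.foldl PySem.Set.add PySem.Set.empty = PySem.Set.ofList xs := rfl

-- B's deduplicated pair set, filtered to one reporter and projected, is A's target set
theorem pvProj_set (l : List String) (id : String) :
    ((PySem.Set.ofList (l.map (fun r => (pvU r, pvT r)))).filter (fun q => q.1 == id)).map Prod.snd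
    = PySem.Set.ofList ((l.filter (fun r => pvU r == id)).map pvT) := by
  have h := pvProj_foldl (l.map (fun r => (pvU r, pvT r))) id PySem.Set.empty
  rw [pvFoldl_add_empty] at h
  simp only [List.filter_map, List.map_map] at h ⊢
  rw [h, PySem.Set.ofList_eq_foldl]
  rfl

-- ===== VERDICT (by name: the statement is the Claim_ definition above) =====
theorem solution_spec : Claim_equal_solution := by
  intro id_list report k _ _
  show solution id_list report k = solution_alt id_list report k
  simp only [solution, solution_alt]
  rw [PySem.List.foldl_prod_mk
        (f := fun (d : PySem.Dict String (PySem.Set String)) id => d.insert id PySem.Set.empty)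
        (g := fun (d : PySem.Dict String Int) id => d.insert id (0 : Int))]
  rw [PySem.List.foldl_prod_mk
        (f := fun (d : PySem.Dict String (PySem.Set String)) r => d.modify (pvU r) PySem.Set.empty (fun s => PySem.Set.add s (pvT r)))
        (g := fun (d : PySem.Dict String Int) r => d.modify (pvT r) 0 (· + 1))]
  rw [PySem.List.foldl_append_singleton_eq_map]
  simp only [List.nil_append]
  refine List.map_congr_left (fun id _ => ?_)
  dsimp only
  rw [pvRd_getD, pvGetD_foldl_insert_const id_list PySem.Dict.empty PySem.Set.empty id (by simp),
      pvFoldl_add_empty]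
  have hbcA : ∀ x : String,
      ((PySem.Set.ofList report).foldl (fun d r => d.modify (pvT r) 0 (· + 1))
        (id_list.foldl (fun d i => d.insert i (0 : Int)) PySem.Dict.empty)).getD x 0
      = (((PySem.Set.ofList report).map pvT).count x : Int) := by
    intro x
    rw [pvBcA_getD, pvGetD_foldl_insert_const id_list PySem.Dict.empty 0 x (by simp), zero_add]
  simp only [hbcA]
  rw [PySem.List.foldl_ite_add_one
        (p := fun target => k ≤ (((PySem.Set.ofList report).map pvT).count target : Int)), zero_add]
  -- both sides are now countP expressions; align B's side
  congr 1
  rw [← pvProj_set (PySem.Set.ofList report) id, List.countP_map]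
  rw [show (fun q : String × String => q.1 == id && decide (k ≤ ((((PySem.Set.ofList report).map pvT).count q.2 : Int))))
        = (fun q : String × String => decide (k ≤ ((((PySem.Set.ofList report).map pvT).count q.2 : Int))) && (q.1 == id))
      from funext fun q => Bool.and_comm _ _]
  rw [← List.countP_filter]
  rfl
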